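-- pv_equiv track=rewrite | github.com/bybybybyby37/xlstm-translation | scripts/eval_ckpt.py | clean_piece_ids
-- ===== SOURCE A (Python) =====
-- def clean_piece_ids(ids, bos_id, eos_id, pad_id):
--     """
--     Remove PAD, truncate at EOS, and drop BOS before decoding.
--     """
--     out = []
--     for x in ids:
--         if x == pad_id:
--             continue
--         if x == eos_id:
--             break
--         if x == bos_id:
--             continue
--         out.append(x)
--     return out
-- ===== SOURCE B (Python) =====
-- def clean_piece_ids(ids, bos_id, eos_id, pad_id):
--     """
--     Remove PAD, truncate at EOS, and drop BOS before decoding.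
--     """
--     cut = ids.index(eos_id) if eos_id in ids else len(ids)
--     return [x for x in ids[:cut] if x not in (pad_id, bos_id)]
-- ===== Notes on version B (the rewrite author's own statement) =====
-- stated objective: idiomatic
-- what changed: Replaced the single interleaved loop (continue/break per element) with an index-based truncation (list.index to locate the first EOS, slice the prefix) followed by a tuple-membership list comprehension; Pre_ excludes the aliasing corner where eos_id == pad_id and an EOS occurs in ids, where A's pad-check-before-eos ordering accidentally disables EOS truncation and B truncates naturally.
-- outside the precondition, e.g. on clean_piece_ids([5, 1, 7], 0, 1, 1): A returns [5, 7], B returns [5]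
import Mathlib
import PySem

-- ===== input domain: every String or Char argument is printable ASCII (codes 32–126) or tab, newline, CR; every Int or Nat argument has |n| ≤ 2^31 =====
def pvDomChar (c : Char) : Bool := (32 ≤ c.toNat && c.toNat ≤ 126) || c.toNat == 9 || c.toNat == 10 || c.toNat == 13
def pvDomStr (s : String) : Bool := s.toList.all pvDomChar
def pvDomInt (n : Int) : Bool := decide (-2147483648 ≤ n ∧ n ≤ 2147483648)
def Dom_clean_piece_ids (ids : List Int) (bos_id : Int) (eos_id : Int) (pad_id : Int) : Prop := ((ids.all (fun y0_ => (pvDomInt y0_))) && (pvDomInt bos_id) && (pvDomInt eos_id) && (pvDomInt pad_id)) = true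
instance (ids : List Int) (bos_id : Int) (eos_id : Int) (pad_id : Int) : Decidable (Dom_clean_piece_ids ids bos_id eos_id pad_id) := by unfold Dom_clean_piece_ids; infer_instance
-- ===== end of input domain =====

-- B replaces A's single continue/break loop with an index-based truncation (locate the first EOS, slice the prefix) followed by a membership filter; Pre_ excludes the corner where eos_id = pad_id and an EOS occurs in ids, where A's pad-check-before-eos ordering accidentally disables EOS truncation. Same cost.


-- ===== PORT A =====
-- Literal port of A: one loop with continue/break, accumulator `out`.
def cleanLoopA (ids : List Int) (bos_id : Int) (eos_id : Int) (pad_id : Int) (out : List Int) : List Int :=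
  match ids with
  | [] => out
  | x :: rest =>
    if x == pad_id then cleanLoopA rest bos_id eos_id pad_id out
    else if x == eos_id then out
    else if x == bos_id then cleanLoopA rest bos_id eos_id pad_id out
    else cleanLoopA rest bos_id eos_id pad_id (out ++ [x])

def clean_piece_ids (ids : List Int) (bos_id : Int) (eos_id : Int) (pad_id : Int) : List Int :=
  cleanLoopA ids bos_id eos_id pad_id []

-- ===== PORT B =====
-- Port of B: cut = ids.index(eos_id) if eos_id in ids else len(ids); then filter ids[:cut].
def clean_piece_ids_alt (ids : List Int) (bos_id : Int) (eos_id : Int) (pad_id : Int) : List Int :=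
  let cut : Nat := if ids.contains eos_id then (PySem.List.index? ids eos_id).getD 0 else ids.length
  (PySem.List.slice ids none (some (cut : Int))).filter (fun x => !([pad_id, bos_id].contains x))

-- ===== PRECONDITION & SPEC =====
-- Pre_ excludes the aliasing corner where eos_id = pad_id and an EOS actually occurs in ids, on which
-- A's pad-check-before-eos ordering accidentally disables EOS truncation; B truncates at EOS there, the natural behaviour.
def Pre_clean_piece_ids (ids : List Int) (bos_id : Int) (eos_id : Int) (pad_id : Int) : Prop :=
  eos_id ≠ pad_id ∨ eos_id ∉ ids
instance (ids : List Int) (bos_id : Int) (eos_id : Int) (pad_id : Int) : Decidable (Pre_clean_piece_ids ids bos_id eos_id pad_id) := by unfold Pre_clean_piece_ids; infer_instance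

def pvWitness_clean_piece_ids : List Int × Int × Int × Int := ([1, 5, 3, 7, 2, 9], 1, 2, 3)

def Spec_clean_piece_ids (ids : List Int) (bos_id : Int) (eos_id : Int) (pad_id : Int) (out : List Int) : Prop := out = clean_piece_ids_alt ids bos_id eos_id pad_id
instance (ids : List Int) (bos_id : Int) (eos_id : Int) (pad_id : Int) (out : List Int) : Decidable (Spec_clean_piece_ids ids bos_id eos_id pad_id out) := by unfold Spec_clean_piece_ids; infer_instance

-- ===== CLAIM (what is proved, stated in full; the proofs are below) =====
def Claim_equal_clean_piece_ids : Prop := ∀ (ids : List Int) (bos_id : Int) (eos_id : Int) (pad_id : Int), Dom_clean_piece_ids ids bos_id eos_id pad_id → Pre_clean_piece_ids ids bos_id eos_id pad_id → Spec_clean_piece_ids ids bos_id eos_id pad_id (clean_piece_ids ids bos_id eos_id pad_id)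

-- ===== LEMMAS AND PROOFS =====

-- B's cut (index of the first EOS, or the length) takes exactly the prefix strictly before the first EOS.
theorem take_cut (e : Int) (l : List Int) :
    l.take (if l.contains e then (PySem.List.index? l e).getD 0 else l.length)
      = l.takeWhile (fun x => x != e) := by
  induction l with
  | nil => simp
  | cons x l ih =>
    by_cases he : x = e
    · subst he
      rw [PySem.List.index?_cons_self]
      simp
    · by_cases hm : e ∈ l
      · obtain ⟨k, hk⟩ := Option.isSome_iff_exists.mp
          ((PySem.List.index?_isSome_iff l e).mpr hm)
        have hk' : List.idxOf? e l = some k := by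
          rw [← PySem.List.index?_eq_idxOf?]; exact hk
        have ih' : l.take k = l.takeWhile (fun y => y != e) := by
          simpa [List.contains_eq_mem, hm, hk'] using ih
        have hc : ((x :: l).contains e) = true := by
          simp [List.contains_eq_mem, hm]
        rw [if_pos hc, PySem.List.index?_cons_of_ne l he, hk]
        simp [List.takeWhile_cons, he, ih']
      · have ih' : l.take l.length = l.takeWhile (fun y => y != e) := by
          simpa [List.contains_eq_mem, hm] using ih
        have hex : ¬e = x := fun h => he h.symm
        have hc : ((x :: l).contains e) = false := by
          simp [List.contains_eq_mem, hm, hex]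
        rw [hc]
        simp [List.takeWhile_cons, he, ih']

theorem alt_eq_takeWhile_filter (ids : List Int) (bos_id eos_id pad_id : Int) :
    clean_piece_ids_alt ids bos_id eos_id pad_id =
      (ids.takeWhile (fun x => x != eos_id)).filter (fun x => !([pad_id, bos_id].contains x)) := by
  show (PySem.List.slice ids none
      (some ((if ids.contains eos_id then (PySem.List.index? ids eos_id).getD 0
                else ids.length : Nat) : Int))).filter
      (fun x => !([pad_id, bos_id].contains x)) = _
  rw [PySem.List.slice_to_natCast, take_cut]

theorem cleanLoopA_eq (ids : List Int) (bos_id eos_id pad_id : Int)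
    (hep : eos_id ≠ pad_id ∨ eos_id ∉ ids) (out : List Int) :
    cleanLoopA ids bos_id eos_id pad_id out =
      out ++ (ids.takeWhile (fun x => x != eos_id)).filter
        (fun x => !([pad_id, bos_id].contains x)) := by
  induction ids generalizing out with
  | nil => simp [cleanLoopA]
  | cons x rest ih =>
    have hrest : eos_id ≠ pad_id ∨ eos_id ∉ rest :=
      hep.imp id (fun h hm => h (List.mem_cons_of_mem x hm))
    have ih := fun out => ih hrest out
    by_cases hp : x = pad_id
    · have hxe : x ≠ eos_id := by
        rcases hep with h | h
        · rw [hp]; exact Ne.symm h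
        · exact fun hx => h (hx ▸ List.mem_cons_self)
      have h1 : cleanLoopA (x :: rest) bos_id eos_id pad_id out
          = cleanLoopA rest bos_id eos_id pad_id out := by
        simp [cleanLoopA, hp]
      rw [h1, ih, List.takeWhile_cons_of_pos (by simp [hxe]),
        List.filter_cons_of_neg (by simp [hp])]
    · by_cases he : x = eos_id
      · subst he; simp [cleanLoopA, hp]
      · by_cases hb : x = bos_id
        · have h1 : cleanLoopA (x :: rest) bos_id eos_id pad_id out
              = cleanLoopA rest bos_id eos_id pad_id out := by
            simp only [cleanLoopA, beq_iff_eq, if_neg hp, if_neg he, if_pos hb]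
          rw [h1, ih, List.takeWhile_cons_of_pos (by simp [he]),
            List.filter_cons_of_neg (by simp [hb])]
        · have h1 : cleanLoopA (x :: rest) bos_id eos_id pad_id out
              = cleanLoopA rest bos_id eos_id pad_id (out ++ [x]) := by
            simp [cleanLoopA, hp, he, hb]
          rw [h1, ih, List.takeWhile_cons_of_pos (by simp [he]),
            List.filter_cons_of_pos (by simp [hp, hb])]
          simp

-- ===== VERDICT (by name: the statement is the Claim_ definition above) =====
theorem clean_piece_ids_spec : Claim_equal_clean_piece_ids := by
  intro ids bos_id eos_id pad_id _ hpre
  unfold Spec_clean_piece_ids clean_piece_ids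
  rw [alt_eq_takeWhile_filter]
  simpa using cleanLoopA_eq ids bos_id eos_id pad_id hpre []
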